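-- pv_equiv track=rewrite | github.com/ArtyomKaltovich/some_algorithms | dots_lie_on_lines.py | dots_lie_on_lines
-- ===== SOURCE A (Python) =====
-- import bisect
--
-- def dots_lie_on_lines(lines, dots):
--     xs = sorted(line[0] for line in lines)
--     ys = sorted(line[1] for line in lines)
--     result = []
--     for dot in dots:
--         started = bisect.bisect_right(xs, dot)
--         finished = bisect.bisect_left(ys, dot)
--         result.append(started - finished)
--     return result
-- ===== SOURCE B (Python) =====
-- def dots_lie_on_lines(lines, dots):
--     # Simpler: per dot, count lines directly (x <= dot minus y < dot); no sort, no bisect.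
--     return [sum(1 for line in lines if line[0] <= dot)
--             - sum(1 for line in lines if line[1] < dot)
--             for dot in dots]
-- ===== Notes on version B (the rewrite author's own statement) =====
-- stated objective: simpler
-- what changed: Replaces the sort-twice-plus-binary-search pipeline with a direct per-dot scan: count lines with x <= dot minus lines with y < dot, no sorting or bisect at all.
import Mathlib
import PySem

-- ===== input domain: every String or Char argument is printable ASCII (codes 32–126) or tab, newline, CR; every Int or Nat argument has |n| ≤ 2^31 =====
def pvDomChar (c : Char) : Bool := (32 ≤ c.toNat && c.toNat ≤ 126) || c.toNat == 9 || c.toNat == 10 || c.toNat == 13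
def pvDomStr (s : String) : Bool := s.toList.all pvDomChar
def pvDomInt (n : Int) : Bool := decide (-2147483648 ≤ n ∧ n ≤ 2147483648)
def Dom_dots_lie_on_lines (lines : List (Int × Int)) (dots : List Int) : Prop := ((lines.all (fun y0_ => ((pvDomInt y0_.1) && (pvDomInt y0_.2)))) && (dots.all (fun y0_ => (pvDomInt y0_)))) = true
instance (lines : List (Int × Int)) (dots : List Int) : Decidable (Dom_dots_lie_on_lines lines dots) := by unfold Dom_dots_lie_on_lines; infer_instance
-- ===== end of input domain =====

-- B replaces A's sort-twice-plus-binary-search with a direct per-dot scan counting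
-- lines with x ≤ dot minus lines with y < dot (simpler; no sorting, no bisect).


-- ===== PORT A =====
def dots_lie_on_lines (lines : List (Int × Int)) (dots : List Int) : List Int :=
  let xs := PySem.List.sorted (lines.map Prod.fst) (fun x => x)
  let ys := PySem.List.sorted (lines.map Prod.snd) (fun x => x)
  dots.foldl (fun result dot =>
    let started : Int := PySem.List.bisectRight xs dot
    let finished : Int := PySem.List.bisectLeft ys dot
    result ++ [started - finished]) []

-- ===== PORT B =====
def dots_lie_on_lines_alt (lines : List (Int × Int)) (dots : List Int) : List Int :=
  dots.map (fun dot =>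
    ((lines.countP (fun line => line.1 ≤ dot) : Int)
      - (lines.countP (fun line => line.2 < dot) : Int)))

-- ===== PRECONDITION & SPEC =====
def Spec_dots_lie_on_lines (lines : List (Int × Int)) (dots : List Int) (out : List Int) : Prop := out = dots_lie_on_lines_alt lines dots
instance (lines : List (Int × Int)) (dots : List Int) (out : List Int) : Decidable (Spec_dots_lie_on_lines lines dots out) := by unfold Spec_dots_lie_on_lines; infer_instance

-- ===== CLAIM (what is proved, stated in full; the proofs are below) =====
def Claim_equal_dots_lie_on_lines : Prop := ∀ (lines : List (Int × Int)) (dots : List Int), Dom_dots_lie_on_lines lines dots → Spec_dots_lie_on_lines lines dots (dots_lie_on_lines lines dots)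

-- ===== LEMMAS AND PROOFS =====

-- On a nondecreasing list, bisect_right is the number of elements ≤ x.
theorem bisectRight_eq_countP (xs : List Int) (x : Int)
    (h : xs.Pairwise (fun a b => a ≤ b)) :
    PySem.List.bisectRight xs x = xs.countP (fun a => decide (a ≤ x)) := by
  obtain ⟨hle, hbefore, hafter⟩ := PySem.List.bisectRight_spec xs x h
  set k := PySem.List.bisectRight xs x with hk
  have hsplit : xs = xs.take k ++ xs.drop k := (List.take_append_drop k xs).symm
  have h1 : (xs.take k).countP (fun a => decide (a ≤ x)) = k := by
    rw [List.countP_eq_length.mpr]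
    · simp [List.length_take, Nat.min_eq_left hle]
    · intro a ha
      rw [List.mem_take_iff_getElem] at ha
      obtain ⟨i, hi, rfl⟩ := ha
      simpa using hbefore i (by omega) (by omega)
  have h2 : (xs.drop k).countP (fun a => decide (a ≤ x)) = 0 := by
    rw [List.countP_eq_zero.mpr]
    intro a ha
    rw [List.mem_drop_iff_getElem] at ha
    obtain ⟨i, hi, rfl⟩ := ha
    simpa using not_le.mpr (hafter (k+i) (by omega) (by omega))
  conv_rhs => rw [hsplit]
  rw [List.countP_append, h1, h2]
  omega

-- On a nondecreasing list, bisect_left is the number of elements < x.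
theorem bisectLeft_eq_countP (xs : List Int) (x : Int)
    (h : xs.Pairwise (fun a b => a ≤ b)) :
    PySem.List.bisectLeft xs x = xs.countP (fun a => decide (a < x)) := by
  obtain ⟨hle, hbefore, hafter⟩ := PySem.List.bisectLeft_spec xs x h
  set k := PySem.List.bisectLeft xs x with hk
  have hsplit : xs = xs.take k ++ xs.drop k := (List.take_append_drop k xs).symm
  have h1 : (xs.take k).countP (fun a => decide (a < x)) = k := by
    rw [List.countP_eq_length.mpr]
    · simp [List.length_take, Nat.min_eq_left hle]
    · intro a ha
      rw [List.mem_take_iff_getElem] at ha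
      obtain ⟨i, hi, rfl⟩ := ha
      simpa using hbefore i (by omega) (by omega)
  have h2 : (xs.drop k).countP (fun a => decide (a < x)) = 0 := by
    rw [List.countP_eq_zero.mpr]
    intro a ha
    rw [List.mem_drop_iff_getElem] at ha
    obtain ⟨i, hi, rfl⟩ := ha
    simpa using not_lt.mpr (hafter (k+i) (by omega) (by omega))
  conv_rhs => rw [hsplit]
  rw [List.countP_append, h1, h2]
  omega

-- A's append-accumulator loop is a map.
theorem foldl_append_singleton (f : Int → Int) (dots acc : List Int) :
    dots.foldl (fun r d => r ++ [f d]) acc = acc ++ dots.map f := by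
  induction dots generalizing acc with
  | nil => simp
  | cons d t ih => simp [List.foldl, ih]

-- ===== VERDICT (by name: the statement is the Claim_ definition above) =====
theorem dots_lie_on_lines_spec : Claim_equal_dots_lie_on_lines := by
  intro lines dots _
  show _ = _
  unfold dots_lie_on_lines dots_lie_on_lines_alt
  rw [foldl_append_singleton
    (fun dot => ((PySem.List.bisectRight (PySem.List.sorted (lines.map Prod.fst) (fun x => x)) dot : Int)
      - (PySem.List.bisectLeft (PySem.List.sorted (lines.map Prod.snd) (fun x => x)) dot : Int)))]
  rw [List.nil_append]
  apply List.map_congr_left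
  intro d _
  rw [bisectRight_eq_countP _ d (PySem.List.sorted_pairwise (lines.map Prod.fst) (fun x => x)),
      bisectLeft_eq_countP _ d (PySem.List.sorted_pairwise (lines.map Prod.snd) (fun x => x)),
      (PySem.List.sorted_perm (lines.map Prod.fst) (fun x => x) false).countP_eq,
      (PySem.List.sorted_perm (lines.map Prod.snd) (fun x => x) false).countP_eq,
      List.countP_map, List.countP_map]
  rfl
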